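-- pv_equiv track=rewrite | github.com/tchin-max/Pymonster-Project | pymonster/beast.py | locate_enemy_list
-- ===== SOURCE A (Python) =====
-- def locate_enemy_list(enemy: tuple) -> list:
--     """
--     Zusammenfassung der Funktion: Liefert das 5x5-Umfeld um eine gegnerische
--     Position als relative Koordinaten.
--
--     Ausgehend von einer gegnerischen Position im 7x7-Feld werden alle
--     Koordinaten mit Abstand bis 2 in x- und y-Richtung gesammelt, solange
--     sie innerhalb des Bereiches [-2, 2] bleiben. Das Ergebnis ist die
--     Menge aller relativen Koordinaten im 5x5-Umfeld des Gegners.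
--
--     Args:
--         enemy (tuple[int, int]): Gegnerkoordinate (x, y) im 7x7-Feld.
--
--     Returns:
--         list[tuple[int, int]]: Liste relativer Koordinaten im 5x5-Umfeld.
--     """
--
--     my_list = list()
--     for r_idx in range(-2, 2 + 1):  # r_idx ist y
--         for c_idx in range(-2, 2 + 1):  # c_idx ist x
--             coordinate = (c_idx + enemy[0], r_idx + enemy[1])
--             if (
--                 coordinate[0] <= 2
--                 and coordinate[0] >= -2
--                 and coordinate[1] <= 2
--                 and coordinate[1] >= -2
--             ):
--                 my_list.append(coordinate)
--     return my_list
-- ===== SOURCE B (Python) =====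
-- def locate_enemy_list(enemy: tuple) -> list:
--     """Same result as A: enumerate only the valid cells using precomputed
--     clamped bounds, y-outer / x-inner, no per-cell bounds test."""
--     x0, y0 = enemy
--     xlo, xhi = max(-2, x0 - 2), min(2, x0 + 2)
--     ylo, yhi = max(-2, y0 - 2), min(2, y0 + 2)
--     result = []
--     for y in range(ylo, yhi + 1):
--         for x in range(xlo, xhi + 1):
--             result.append((x, y))
--     return result
-- ===== Notes on version B (the rewrite author's own statement) =====
-- stated objective: simpler
-- what changed: Replaces the fixed 25-cell scan with a per-cell bounds filter by precomputing the clamped x/y ranges once and enumerating only the valid cells (same y-outer/x-inner order), with no test inside the loops.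
import Mathlib
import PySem

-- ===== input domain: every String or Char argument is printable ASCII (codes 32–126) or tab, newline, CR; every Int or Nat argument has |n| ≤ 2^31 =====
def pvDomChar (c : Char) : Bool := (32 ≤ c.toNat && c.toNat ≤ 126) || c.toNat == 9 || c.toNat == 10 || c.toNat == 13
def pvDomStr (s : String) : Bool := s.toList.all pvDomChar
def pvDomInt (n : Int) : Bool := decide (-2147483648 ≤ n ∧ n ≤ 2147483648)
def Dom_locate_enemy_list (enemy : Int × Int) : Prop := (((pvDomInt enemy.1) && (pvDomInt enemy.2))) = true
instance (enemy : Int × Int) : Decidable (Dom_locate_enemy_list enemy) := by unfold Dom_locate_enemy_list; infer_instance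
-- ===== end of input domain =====

-- B precomputes the clamped x/y ranges once and enumerates only the valid
-- cells (same y-outer/x-inner order) instead of A's 25-cell scan-and-filter;
-- objective: simpler.

-- ===== PORT A =====
def locate_enemy_list (enemy : Int × Int) : List (Int × Int) :=
  (PySem.List.pyRange (-2) (2 + 1) 1).foldl (fun my_list r_idx =>
    (PySem.List.pyRange (-2) (2 + 1) 1).foldl (fun my_list c_idx =>
      let coordinate := (c_idx + enemy.1, r_idx + enemy.2)
      if coordinate.1 ≤ 2 ∧ coordinate.1 ≥ -2 ∧ coordinate.2 ≤ 2 ∧ coordinate.2 ≥ -2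
      then my_list ++ [coordinate]
      else my_list) my_list) []

-- ===== PORT B =====
def locate_enemy_list_alt (enemy : Int × Int) : List (Int × Int) :=
  let xlo := max (-2) (enemy.1 - 2)
  let xhi := min 2 (enemy.1 + 2)
  let ylo := max (-2) (enemy.2 - 2)
  let yhi := min 2 (enemy.2 + 2)
  (PySem.List.pyRange ylo (yhi + 1) 1).foldl (fun result y =>
    (PySem.List.pyRange xlo (xhi + 1) 1).foldl (fun result x =>
      result ++ [(x, y)]) result) []

-- ===== PRECONDITION & SPEC =====
def Spec_locate_enemy_list (enemy : Int × Int) (out : List (Int × Int)) : Prop := out = locate_enemy_list_alt enemy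
instance (enemy : Int × Int) (out : List (Int × Int)) : Decidable (Spec_locate_enemy_list enemy out) := by unfold Spec_locate_enemy_list; infer_instance

-- ===== CLAIM (what is proved, stated in full; the proofs are below) =====
def Claim_equal_locate_enemy_list : Prop := ∀ (enemy : Int × Int), Dom_locate_enemy_list enemy → Spec_locate_enemy_list enemy (locate_enemy_list enemy)

-- ===== LEMMAS AND PROOFS =====

-- Folding a function that leaves the accumulator unchanged on every element is the identity.
theorem foldl_id {α β : Type} (l : List α) (f : β → α → β)
    (h : ∀ b a, a ∈ l → f b a = b) (acc : β) : l.foldl f acc = acc := by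
  induction l generalizing acc with
  | nil => rfl
  | cons a l ih =>
      rw [List.foldl_cons, h acc a (List.mem_cons_self ..)]
      exact ih (fun b a' ha => h b a' (List.mem_cons_of_mem _ ha)) acc

-- If the enemy is at distance ≥ 5 in x or y, A appends nothing.
theorem a_empty (x y : Int) (h : x ≤ -5 ∨ 5 ≤ x ∨ y ≤ -5 ∨ 5 ≤ y) :
    locate_enemy_list (x, y) = [] := by
  unfold locate_enemy_list
  refine foldl_id _ _ (fun b r hr => ?_) []
  refine foldl_id _ _ (fun b' c hc => ?_) b
  have h1 := PySem.List.mem_pyRange_one.mp hr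
  have h2 := PySem.List.mem_pyRange_one.mp hc
  exact if_neg (by dsimp only; omega)

-- If the enemy is at distance ≥ 5 in x or y, one of B's clamped ranges is empty.
theorem b_empty (x y : Int) (h : x ≤ -5 ∨ 5 ≤ x ∨ y ≤ -5 ∨ 5 ≤ y) :
    locate_enemy_list_alt (x, y) = [] := by
  unfold locate_enemy_list_alt
  dsimp only
  rcases h with h | h | h | h
  · refine foldl_id _ _ (fun b r _ => ?_) []
    rw [PySem.List.pyRange_one_eq_nil (by omega)]; rfl
  · refine foldl_id _ _ (fun b r _ => ?_) []
    rw [PySem.List.pyRange_one_eq_nil (by omega)]; rfl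
  · rw [PySem.List.pyRange_one_eq_nil (a := max (-2) (y - 2)) (by omega)]; rfl
  · rw [PySem.List.pyRange_one_eq_nil (a := max (-2) (y - 2)) (by omega)]; rfl

-- ===== VERDICT (by name: the statement is the Claim_ definition above) =====
theorem locate_enemy_list_spec : Claim_equal_locate_enemy_list := by
  intro ⟨x, y⟩ _
  show locate_enemy_list (x, y) = locate_enemy_list_alt (x, y)
  by_cases hx : -4 ≤ x ∧ x ≤ 4
  · by_cases hy : -4 ≤ y ∧ y ≤ 4
    · obtain ⟨hx1, hx2⟩ := hx
      obtain ⟨hy1, hy2⟩ := hy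
      interval_cases x <;> interval_cases y <;> decide
    · rw [a_empty x y (by omega), b_empty x y (by omega)]
  · rw [a_empty x y (by omega), b_empty x y (by omega)]
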